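-- pv_equiv track=rewrite | github.com/ahmo-boy/skypro_project | main_function.py | check_if_executed
-- ===== SOURCE A (Python) =====
-- def check_if_executed(data):
--     """
--     Функция проверяет и выбирает только подходящие операции
--     """
--     # Создаем список для хранения подходящих словарей
--     executed_items = []
--
--     # Перебираем список словарей, начиная с последнего элемента
--     for item in reversed(data):
--         if item.get('state') == "EXECUTED":
--             executed_items.append(item)
--         if len(executed_items) == 5:
--             break
--     return executed_items
-- ===== SOURCE B (Python) =====
-- def check_if_executed(data):
--     """
--     Функция проверяет и выбирает только подходящие операции
--     """
--     executed = [item for item in data if item.get('state') == "EXECUTED"]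
--     return executed[-5:][::-1]
-- ===== Notes on version B (the rewrite author's own statement) =====
-- stated objective: simpler
-- what changed: Replaces A's reversed iteration with a bounded accumulator and early break by a single forward filter comprehension followed by slicing the last five and reversing them.
import Mathlib
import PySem

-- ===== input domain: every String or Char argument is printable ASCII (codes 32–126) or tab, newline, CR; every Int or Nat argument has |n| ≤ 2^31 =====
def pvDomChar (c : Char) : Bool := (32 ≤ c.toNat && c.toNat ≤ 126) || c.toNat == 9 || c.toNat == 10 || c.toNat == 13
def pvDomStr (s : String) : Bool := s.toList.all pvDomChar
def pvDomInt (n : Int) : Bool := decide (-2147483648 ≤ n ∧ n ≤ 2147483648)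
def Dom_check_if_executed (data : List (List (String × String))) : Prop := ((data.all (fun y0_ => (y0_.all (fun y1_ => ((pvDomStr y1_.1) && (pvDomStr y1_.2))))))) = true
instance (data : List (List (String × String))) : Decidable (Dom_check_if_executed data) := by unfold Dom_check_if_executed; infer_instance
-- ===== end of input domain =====

-- B replaces A's reversed loop with early break by a forward filter plus [-5:][::-1] slicing (simpler; same cost).
-- ===== PORT A =====
-- dicts are association lists; item.get('state') = first-match lookup = List.lookup
def pvGetState (item : List (String × String)) : Option String := item.lookup "state"

-- the loop 'for item in reversed(data): …' with accumulator and break at length 5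
def pvLoopA : List (List (String × String)) → List (List (String × String)) → List (List (String × String))
  | [], acc => acc
  | item :: rest, acc =>
    let acc' := if pvGetState item == some "EXECUTED" then acc ++ [item] else acc
    if acc'.length == 5 then acc' else pvLoopA rest acc'

def check_if_executed (data : List (List (String × String))) : List (List (String × String)) :=
  pvLoopA data.reverse []

-- ===== PORT B =====
def check_if_executed_alt (data : List (List (String × String))) : List (List (String × String)) :=
  (PySem.List.slice (data.filter (fun item => pvGetState item == some "EXECUTED"))
    (some (-5)) none).reverse

-- ===== PRECONDITION & SPEC =====
def Spec_check_if_executed (data : List (List (String × String))) (out : List (List (String × String))) : Prop := out = check_if_executed_alt data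
instance (data : List (List (String × String))) (out : List (List (String × String))) : Decidable (Spec_check_if_executed data out) := by unfold Spec_check_if_executed; infer_instance

-- ===== CLAIM (what is proved, stated in full; the proofs are below) =====
def Claim_equal_check_if_executed : Prop := ∀ (data : List (List (String × String))), Dom_check_if_executed data → Spec_check_if_executed data (check_if_executed data)

-- ===== LEMMAS AND PROOFS =====
theorem pvLoopA_eq (xs acc : List (List (String × String))) (h : acc.length < 5) :
    pvLoopA xs acc =
      (acc ++ xs.filter (fun item => pvGetState item == some "EXECUTED")).take 5 := by
  induction xs generalizing acc with
  | nil =>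
    simp [pvLoopA, List.take_of_length_le (Nat.le_of_lt h)]
  | cons x rest ih =>
    by_cases hp : (pvGetState x == some "EXECUTED") = true
    · simp only [pvLoopA, hp, if_pos]
      by_cases h5 : (acc ++ [x]).length = 5
      · simp only [h5]
        simp only [List.filter_cons, hp, if_pos]
        rw [show acc ++ x :: List.filter (fun item => pvGetState item == some "EXECUTED") rest
              = (acc ++ [x]) ++ List.filter (fun item => pvGetState item == some "EXECUTED") rest by simp]
        rw [← h5, List.take_left]
        simp
      · have hlt : (acc ++ [x]).length < 5 := by
          simp at h5 ⊢; omega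
        rw [if_neg (by simpa using h5)]
        rw [ih _ hlt]
        simp [hp]
    · simp only [pvLoopA, hp, Bool.false_eq_true, if_false]
      rw [if_neg (by simpa using Nat.ne_of_lt h), ih _ h]
      simp [hp]

-- ===== VERDICT (by name: the statement is the Claim_ definition above) =====
theorem check_if_executed_spec : Claim_equal_check_if_executed := by
  intro data _
  unfold Spec_check_if_executed check_if_executed check_if_executed_alt
  rw [pvLoopA_eq _ _ (by simp)]
  rw [PySem.List.slice_from_neg_ofNat _ 5 (by omega)]
  rw [List.nil_append, List.filter_reverse]
  exact List.take_reverse
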